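-- pv_equiv track=rewrite | github.com/nightglyde/traffic-simulation | simulation/src/analysis/analyse.py | centreText
-- ===== SOURCE A (Python) =====
-- def centreText(text, width):
--
--     oddness = width % 2
--
--     text = str(text)
--
--     if len(text) % 2 != oddness:
--         text = " " + text
--
--     while len(text) < width:
--         text = " " + text + " "
--
--     return text
-- ===== SOURCE B (Python) =====
-- def centreText(text, width):
--     t = str(text)
--     adj = (len(t) - width) % 2          # 1 iff parities of len(t) and width differ
--     pad = max(0, width - (len(t) + adj))  # even by construction
--     c = pad // 2
--     return " " * (c + adj) + t + " " * c
-- ===== Notes on version B (the rewrite author's own statement) =====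
-- stated objective: simpler
-- what changed: Replaces the one-space-at-a-time padding loop (and the parity-fixup prepend) with a closed-form computation of the left and right pad counts, building the result in one concatenation.
import Mathlib
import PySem

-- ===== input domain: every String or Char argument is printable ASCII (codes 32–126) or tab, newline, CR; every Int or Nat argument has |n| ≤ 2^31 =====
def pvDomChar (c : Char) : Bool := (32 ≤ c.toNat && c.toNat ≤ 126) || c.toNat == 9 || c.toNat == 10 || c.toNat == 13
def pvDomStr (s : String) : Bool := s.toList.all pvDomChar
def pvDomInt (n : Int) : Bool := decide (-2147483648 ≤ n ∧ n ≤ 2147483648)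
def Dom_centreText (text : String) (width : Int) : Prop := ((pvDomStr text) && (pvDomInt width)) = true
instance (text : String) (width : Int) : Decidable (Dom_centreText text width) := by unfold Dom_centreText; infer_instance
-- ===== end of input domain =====

-- B replaces A's one-space-at-a-time padding loop by closed-form pad counts (simpler, one concatenation).

-- ===== PORT A =====
-- the 'while len(text) < width: text = " " + text + " "' loop; fuel only makes it total:
-- the loop body runs exactly while len < width, and (width - len).toNat steps always suffice
-- (each iteration grows the length by 2), so the fuel guard never fires on the loop's own exit path.
def centreLoop (fuel : Nat) (t : List Char) (width : Int) : List Char :=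
  match fuel with
  | 0 => t
  | f + 1 => if (t.length : Int) < width then centreLoop f (' ' :: (t ++ [' '])) width else t

def centreText (text : String) (width : Int) : String :=
  let oddness := PySem.Int.mod width 2
  let t := text.toList
  let t := if ((t.length : Int) % 2) ≠ oddness then ' ' :: t else t
  String.ofList (centreLoop (width - t.length).toNat t width)

-- ===== PORT B =====
def centreText_alt (text : String) (width : Int) : String :=
  let t := text.toList
  let adj := PySem.Int.mod ((t.length : Int) - width) 2
  let pad := max 0 (width - ((t.length : Int) + adj))
  let c := PySem.Int.floordiv pad 2
  String.ofList (List.replicate (c + adj).toNat ' ' ++ t ++ List.replicate c.toNat ' ')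

-- ===== PRECONDITION & SPEC =====
def Spec_centreText (text : String) (width : Int) (out : String) : Prop := out = centreText_alt text width
instance (text : String) (width : Int) (out : String) : Decidable (Spec_centreText text width out) := by unfold Spec_centreText; infer_instance

-- ===== CLAIM (what is proved, stated in full; the proofs are below) =====
def Claim_equal_centreText : Prop := ∀ (text : String) (width : Int), Dom_centreText text width → Spec_centreText text width (centreText text width)

-- ===== LEMMAS AND PROOFS =====

theorem rep_cons (n : Nat) (a : Char) (l : List Char) :
    List.replicate n a ++ a :: l = a :: (List.replicate n a ++ l) := by
  induction n with
  | zero => simp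
  | succ k ih => simp [List.replicate_succ, ih]

-- the loop, on a list whose length has the same parity as width and with enough fuel, pads symmetrically
theorem centreLoop_eq (fuel : Nat) (t : List Char) (width : Int)
    (hfuel : width - t.length ≤ 2 * fuel)
    (hpar : (t.length : Int) % 2 = width % 2) :
    centreLoop fuel t width =
      List.replicate (max 0 (width - t.length) / 2).toNat ' ' ++ t ++
      List.replicate (max 0 (width - t.length) / 2).toNat ' ' := by
  induction fuel generalizing t with
  | zero =>
    have : max 0 (width - t.length) = 0 := by omega
    simp [centreLoop, this]
  | succ f ih =>
    by_cases h : (t.length : Int) < width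
    · have hge2 : (2 : Int) ≤ width - t.length := by omega
      rw [centreLoop, if_pos h,
          ih (' ' :: (t ++ [' ']))
            (by simp only [List.length_cons, List.length_append, List.length_nil]; push_cast; omega)
            (by simp only [List.length_cons, List.length_append, List.length_nil]; push_cast; omega)]
      have hlen : ((' ' :: (t ++ [' '])).length : Int) = (t.length : Int) + 2 := by
        simp; omega
      rw [hlen]
      have hc : max 0 (width - t.length) / 2 = max 0 (width - ((t.length : Int) + 2)) / 2 + 1 := by
        have h1 : max 0 (width - t.length) = width - t.length := by omega
        have h2 : max 0 (width - ((t.length : Int) + 2)) = width - t.length - 2 := by omega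
        rw [h1, h2]; omega
      rw [hc]
      have hnn : 0 ≤ max 0 (width - ((t.length : Int) + 2)) / 2 := by positivity
      have htn : (max 0 (width - ((t.length : Int) + 2)) / 2 + 1).toNat
          = (max 0 (width - ((t.length : Int) + 2)) / 2).toNat + 1 := by omega
      rw [htn, List.replicate_succ]
      simp only [List.append_assoc, List.cons_append, rep_cons, List.nil_append]
    · rw [centreLoop, if_neg h]
      have : max 0 (width - t.length) = 0 := by omega
      simp [this]

-- ===== VERDICT (by name: the statement is the Claim_ definition above) =====
theorem centreText_spec : Claim_equal_centreText := by
  intro text width _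
  unfold Spec_centreText centreText centreText_alt
  simp only [PySem.Int.mod_eq_emod_of_pos (by norm_num : (0:Int) < 2),
             PySem.Int.floordiv_eq_ediv_of_pos (by norm_num : (0:Int) < 2)]
  set t := text.toList with ht
  set L : Int := (t.length : Int) with hL
  by_cases hp : L % 2 ≠ width % 2
  · have hadj : (L - width) % 2 = 1 := by omega
    rw [if_pos (by simpa [hL] using hp), hadj]
    rw [centreLoop_eq _ (' ' :: t) width
          (by simp only [List.length_cons]; push_cast; omega)
          (by simp only [List.length_cons]; push_cast; omega)]
    have hlen : (((' ' :: t).length : Int)) = L + 1 := by simp [hL]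
    rw [hlen]
    have hc : 0 ≤ max 0 (width - (L + 1)) / 2 := by positivity
    have htn : (max 0 (width - (L + 1)) / 2 + 1).toNat = (max 0 (width - (L + 1)) / 2).toNat + 1 := by omega
    rw [htn, List.replicate_succ']
    simp
  · have hadj : (L - width) % 2 = 0 := by omega
    rw [if_neg (by simpa [hL] using hp), hadj]
    rw [centreLoop_eq _ t width (by omega) (by omega)]
    simp [hL]
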